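-- pv_equiv track=rewrite | github.com/oqc-community/qat | src/qat/purr/compiler/error_mitigation/readout_mitigation.py | remap_result
-- ===== SOURCE A (Python) =====
-- def remap_result(results, mapping, output_length):
--     output = {}
--     for bitstring, result in results.items():
--         tmp_bit_string = ["0" for _ in range(output_length)]
--         for i, bit in enumerate(bitstring):
--             tmp_bit_string[mapping[str(i)]] = bit
--         output["".join(tmp_bit_string)] = result
--     return output
-- ===== SOURCE B (Python) =====
-- def remap_result(results, mapping, output_length):
--     # Stage 1: for each distinct bitstring length n, build once an inverse table
--     # slot -> input index (last write wins over increasing i, as in the original).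
--     inverses = {}
--     for bitstring in results:
--         n = len(bitstring)
--         if n not in inverses:
--             inv = {}
--             for i in range(n):
--                 inv[mapping[str(i)]] = i
--             inverses[n] = inv
--     # Stage 2: gather - read each output slot from its source index, '0' if unmapped.
--     output = {}
--     for bitstring, result in results.items():
--         inv = inverses[len(bitstring)]
--         output["".join(bitstring[inv[j]] if j in inv else "0" for j in range(output_length))] = result
--     return output
-- ===== Notes on version B (the rewrite author's own statement) =====
-- stated objective: alternative
-- what changed: B stages the work: a first pass builds, once per distinct bitstring length, an inverse table from output slot to the input index that feeds it (last write wins like A), and the main loop then GATHERS bitstring[inverse[j]] over the output slots instead of scattering each bit into a mutated scratch list, hoisting all mapping[str(i)] lookups out of the per-result loop.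
-- outside the precondition, e.g. on remap_result({'1': 5}, {'0': -1}, 2): A returns {'01': 5}, B returns {'00': 5}
import Mathlib
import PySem

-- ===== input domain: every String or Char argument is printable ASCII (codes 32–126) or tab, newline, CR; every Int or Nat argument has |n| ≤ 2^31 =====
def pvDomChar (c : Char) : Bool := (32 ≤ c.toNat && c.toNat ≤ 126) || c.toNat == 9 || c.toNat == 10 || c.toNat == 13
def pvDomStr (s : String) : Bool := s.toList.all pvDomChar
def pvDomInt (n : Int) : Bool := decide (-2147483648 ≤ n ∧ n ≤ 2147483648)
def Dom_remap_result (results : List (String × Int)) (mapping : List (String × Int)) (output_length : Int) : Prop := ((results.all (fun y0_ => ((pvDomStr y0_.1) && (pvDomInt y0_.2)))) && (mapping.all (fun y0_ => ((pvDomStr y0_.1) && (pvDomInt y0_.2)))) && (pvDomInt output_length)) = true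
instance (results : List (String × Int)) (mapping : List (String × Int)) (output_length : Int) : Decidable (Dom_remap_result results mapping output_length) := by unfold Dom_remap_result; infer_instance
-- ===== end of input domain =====

-- B replaces A's per-bitstring scatter into a mutated scratch list by a staged computation:
-- one slot→input-index inverse table is built per DISTINCT bitstring length before the main
-- loop, and each output string is then produced by GATHERING bitstring[inverse[j]] over the
-- output slots (hoists all mapping lookups out of the per-result loop).

-- shared primitive: Python's `mapping[str(i)]` (dict lookup); the `.getD 0` total form is
-- exact exactly where the key is present, which Pre_ guarantees.
def pvSlot? (mapping : List (String × Int)) (i : Int) : Option Int :=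
  (PySem.Dict.ofList mapping).get? (PySem.Int.toStr i)

def pvMapGet (mapping : List (String × Int)) (i : Int) : Int :=
  (pvSlot? mapping i).getD 0

-- ===== PORT A =====
def remap_result (results : List (String × Int)) (mapping : List (String × Int)) (output_length : Int) : List (String × Int) :=
  (results.foldl (fun (out : PySem.Dict String Int) p =>
      -- tmp_bit_string = ["0" for _ in range(output_length)]  (list of one-char strings ≙ List Char)
      let tmp0 : List Char := (PySem.List.pyRange 0 output_length 1).map (fun _ => '0')
      -- for i, bit in enumerate(bitstring): tmp_bit_string[mapping[str(i)]] = bit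
      let tmp : List Char := (PySem.List.enumerate p.1.toList 0).foldl
          (fun t iv => PySem.List.pySetD t (pvMapGet mapping iv.1) iv.2) tmp0
      -- output["".join(tmp_bit_string)] = result
      out.insert (String.ofList tmp) p.2)
    PySem.Dict.empty).items

-- ===== PORT B =====
-- Source B's inner loop: inv = {}; for i in range(n): inv[mapping[str(i)]] = i
def pvInvFor (mapping : List (String × Int)) (n : Int) : PySem.Dict Int Int :=
  (PySem.List.pyRange 0 n 1).foldl (fun d i => d.insert (pvMapGet mapping i) i) PySem.Dict.empty

def remap_result_alt (results : List (String × Int)) (mapping : List (String × Int)) (output_length : Int) : List (String × Int) :=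
  -- stage 1: inverses = {}; for bitstring in results: if len not cached, build inverse for it
  let inverses : PySem.Dict Int (PySem.Dict Int Int) :=
    results.foldl (fun c p =>
      let n : Int := (p.1.toList.length : Int)
      if c.contains n then c else c.insert n (pvInvFor mapping n)) PySem.Dict.empty
  -- stage 2: gather bitstring[inv[j]] if j in inv else "0" over j in range(output_length)
  (results.foldl (fun (out : PySem.Dict String Int) p =>
      let inv := inverses.getD ((p.1.toList.length : Nat) : Int) PySem.Dict.empty
      out.insert (String.ofList ((PySem.List.pyRange 0 output_length 1).map (fun j =>
        match inv.get? j with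
        | some i => PySem.List.pyGetD p.1.toList i '0'  -- bitstring[inv[j]]: inv's values are 0 ≤ i < len, so the total form is exact
        | none => '0'))) p.2)
    PySem.Dict.empty).items

-- ===== PRECONDITION & SPEC =====
-- position i of some bitstring is mapped (key present) to a genuine output position in [0, L)
def pvOk (mapping : List (String × Int)) (L i : Int) : Bool :=
  match pvSlot? mapping i with
  | some v => decide (0 ≤ v ∧ v < L)
  | none => false

-- Pre_: every position i of every bitstring in results has mapping["str(i)"] present with a
-- value in [0, output_length) — the natural domain of a readout position map.  Outside it A
-- raises KeyError/IndexError, EXCEPT for mappings sending a used position to a negative target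
-- in [-output_length, 0): those are excluded although A still returns — A then writes the bit
-- into the TAIL of the output string through Python's negative-index wraparound; such targets
-- are malformed for a position map, and B leaves those slots '0'.
def Pre_remap_result (results : List (String × Int)) (mapping : List (String × Int)) (output_length : Int) : Prop :=
  (results.all (fun p => (List.range p.1.toList.length).all
      (fun k => pvOk mapping output_length (k : Int)))) = true

instance (results : List (String × Int)) (mapping : List (String × Int)) (output_length : Int) : Decidable (Pre_remap_result results mapping output_length) := by unfold Pre_remap_result; infer_instance

def pvWitness_remap_result : (List (String × Int)) × (List (String × Int)) × Int :=
  ([("10", 3)], [("0", 1), ("1", 0)], 2)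

def Spec_remap_result (results : List (String × Int)) (mapping : List (String × Int)) (output_length : Int) (out : List (String × Int)) : Prop := out = remap_result_alt results mapping output_length
instance (results : List (String × Int)) (mapping : List (String × Int)) (output_length : Int) (out : List (String × Int)) : Decidable (Spec_remap_result results mapping output_length out) := by unfold Spec_remap_result; infer_instance

-- ===== CLAIM (what is proved, stated in full; the proofs are below) =====
def Claim_equal_remap_result : Prop := ∀ (results : List (String × Int)) (mapping : List (String × Int)) (output_length : Int), Dom_remap_result results mapping output_length → Pre_remap_result results mapping output_length → Spec_remap_result results mapping output_length (remap_result results mapping output_length)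

-- ===== LEMMAS AND PROOFS =====

-- in the good region the looked-up target is a genuine index in [0, L)
lemma pv_good (mapping : List (String × Int)) (L i : Int)
    (hok : pvOk mapping L i = true) :
    0 ≤ pvMapGet mapping i ∧ pvMapGet mapping i < L := by
  unfold pvOk at hok; unfold pvMapGet
  cases h : pvSlot? mapping i <;> rw [h] at hok <;> simp_all

-- A's write loop preserves the scratch list's length
lemma pv_len_foldl_pySetD (g : Int → Int) :
    ∀ (es : List (Int × Char)) (t : List Char),
    (es.foldl (fun t iv => PySem.List.pySetD t (g iv.1) iv.2) t).length = t.length := by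
  intro es
  induction es with
  | nil => intro t; rfl
  | cons e es ih => intro t; simp only [List.foldl_cons]; rw [ih, PySem.List.length_pySetD]

-- pointwise: reading slot j of A's written-through scratch list is looking up j in the
-- slot→bit dictionary accumulated over the same (index, bit) pairs
lemma pv_foldl_set_eq_dict (g : Int → Int) (L : Int) (es : List (Int × Char)) :
    ∀ (t : List Char) (j : Int), 0 ≤ j → j < L → t.length = L.toNat →
    (∀ p ∈ es, 0 ≤ g p.1 ∧ g p.1 < L) →
    PySem.List.pyGetD (es.foldl (fun t iv => PySem.List.pySetD t (g iv.1) iv.2) t) j '0'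
      = (es.foldl (fun (d : PySem.Dict Int Char) iv => d.insert (g iv.1) iv.2)
          PySem.Dict.empty).getD j (PySem.List.pyGetD t j '0') := by
  induction es using List.reverseRecOn with
  | nil => intro t j _ _ _ _; simp [PySem.Dict.getD_empty]
  | append_singleton es iv ih =>
    intro t j hj0 hjL hlen hall
    have hv := hall iv (by simp)
    have hlen' : (es.foldl (fun t iv => PySem.List.pySetD t (g iv.1) iv.2) t).length = L.toNat := by
      rw [pv_len_foldl_pySetD]; exact hlen
    have hvnat : g iv.1 = (((g iv.1).toNat : Nat) : Int) := (Int.toNat_of_nonneg hv.1).symm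
    rw [List.foldl_append, List.foldl_append]
    simp only [List.foldl_cons, List.foldl_nil]
    have hjnat : j = ((j.toNat : Nat) : Int) := (Int.toNat_of_nonneg hj0).symm
    have IH := ih t j hj0 hjL hlen (fun p hp => hall p (by simp [hp]))
    rw [hvnat, hjnat, PySem.List.pyGetD_pySetD_natCast _ _ _ _ _ (by rw [hlen']; omega)]
    rw [PySem.Dict.getD_insert]
    split_ifs with h1 h2
    · rfl
    · omega
    · omega
    · rw [← hjnat]; exact IH

-- the slot→bit dictionary is the slot→index dictionary read through the bitstring
lemma pv_bit_eq_idx (g : Int → Int) (cs : List Char) :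
    ∀ (es : List (Int × Char)), (∀ p ∈ es, PySem.List.pyGetD cs p.1 '0' = p.2) → ∀ (j : Int),
    (es.foldl (fun (d : PySem.Dict Int Char) iv => d.insert (g iv.1) iv.2) PySem.Dict.empty).get? j
      = ((es.foldl (fun (d : PySem.Dict Int Int) iv => d.insert (g iv.1) iv.1) PySem.Dict.empty).get? j).map
          (fun i => PySem.List.pyGetD cs i '0') := by
  intro es
  induction es using List.reverseRecOn with
  | nil => intro _ j; simp [PySem.Dict.get?_empty]
  | append_singleton es iv ih =>
    intro hall j
    rw [List.foldl_append, List.foldl_append]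
    simp only [List.foldl_cons, List.foldl_nil]
    rw [PySem.Dict.get?_insert, PySem.Dict.get?_insert]
    split_ifs with h1
    · simp [hall iv (by simp)]
    · exact ih (fun p hp => hall p (by simp [hp])) j

-- the slot→index dictionary over enumerate(cs) IS pvInvFor at cs's length
lemma pv_idx_eq_invFor (mapping : List (String × Int)) (cs : List Char) :
    (PySem.List.enumerate cs 0).foldl
        (fun (d : PySem.Dict Int Int) iv => d.insert (pvMapGet mapping iv.1) iv.1) PySem.Dict.empty
      = pvInvFor mapping (cs.length : Int) := by
  unfold pvInvFor
  have h := List.foldl_map (f := fun (p : Int × Char) => p.1)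
      (g := fun (d : PySem.Dict Int Int) i => d.insert (pvMapGet mapping i) i)
      (l := PySem.List.enumerate cs 0) (init := PySem.Dict.empty)
  rw [← h, PySem.List.map_fst_enumerate]
  norm_num

-- per bitstring: A's joined scratch list equals B's gather over the output slots
lemma pv_chars_eq (mapping : List (String × Int)) (L : Int) (cs : List Char)
    (hgood : ∀ p ∈ PySem.List.enumerate cs 0, 0 ≤ pvMapGet mapping p.1 ∧ pvMapGet mapping p.1 < L) :
    (PySem.List.enumerate cs 0).foldl
        (fun t iv => PySem.List.pySetD t (pvMapGet mapping iv.1) iv.2)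
        ((PySem.List.pyRange 0 L 1).map (fun _ => '0'))
      = (PySem.List.pyRange 0 L 1).map (fun j =>
          match (pvInvFor mapping (cs.length : Int)).get? j with
          | some i => PySem.List.pyGetD cs i '0'
          | none => '0') := by
  have hlen0 : ((PySem.List.pyRange 0 L 1).map (fun _ => '0')).length = L.toNat := by
    simp [PySem.List.length_pyRange_one]
  have henum : ∀ p ∈ PySem.List.enumerate cs 0, PySem.List.pyGetD cs p.1 '0' = p.2 := by
    intro p hp
    rcases (PySem.List.mem_enumerate_iff _ _ _).1 hp with ⟨k, hk, rfl⟩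
    simp [PySem.List.pyGetD_natCast, List.getElem?_eq_getElem hk]
  apply List.ext_getElem
  · rw [pv_len_foldl_pySetD, hlen0]; simp [PySem.List.length_pyRange_one]
  · intro k h1 h2
    have hkL : k < L.toNat := by
      rw [pv_len_foldl_pySetD, hlen0] at h1; exact h1
    have hkLi : (k : Int) < L := by omega
    have key := pv_foldl_set_eq_dict (pvMapGet mapping) L (PySem.List.enumerate cs 0)
      ((PySem.List.pyRange 0 L 1).map (fun _ => '0')) (k : Int)
      (by positivity) hkLi hlen0 hgood
    have hdef : PySem.List.pyGetD ((PySem.List.pyRange 0 L 1).map (fun _ => '0')) (k : Int) '0' = '0' := by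
      rw [PySem.List.pyGetD_map_pyRange_of_nonneg _ _ _ _ (by positivity) hkLi]
    rw [hdef] at key
    rw [PySem.Dict.getD_eq_get?_getD, pv_bit_eq_idx (pvMapGet mapping) cs _ henum,
        pv_idx_eq_invFor mapping cs] at key
    rw [List.getElem_map, PySem.List.getElem_pyRange_one]
    rw [← List.getD_eq_getElem _ '0' h1, ← PySem.List.pyGetD_natCast]
    rw [key]
    cases hg : (pvInvFor mapping (cs.length : Int)).get? ((k : Int)) <;> simp [hg]

-- ===== the length cache =====

def pvCacheStep (mapping : List (String × Int)) (c : PySem.Dict Int (PySem.Dict Int Int)) (p : String × Int) : PySem.Dict Int (PySem.Dict Int Int) :=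
  let n : Int := (p.1.toList.length : Int)
  if c.contains n then c else c.insert n (pvInvFor mapping n)

-- every value the cache ever holds at key k is pvInvFor k
lemma pv_cache_inv (mapping : List (String × Int)) :
    ∀ (rs : List (String × Int)) (c : PySem.Dict Int (PySem.Dict Int Int)),
    (∀ k v, c.get? k = some v → v = pvInvFor mapping k) →
    ∀ k v, (rs.foldl (pvCacheStep mapping) c).get? k = some v → v = pvInvFor mapping k := by
  intro rs
  induction rs with
  | nil => intro c hc; exact hc
  | cons p rs ih =>
    intro c hc
    refine ih _ ?_
    intro k v hv
    simp only [pvCacheStep] at hv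
    split_ifs at hv with hcon
    · exact hc k v hv
    · rw [PySem.Dict.get?_insert] at hv
      split_ifs at hv with h
      · cases hv; rw [h]
      · exact hc k v hv

-- once present, a key stays present through the cache fold
lemma pv_cache_mono (mapping : List (String × Int)) :
    ∀ (rs : List (String × Int)) (c : PySem.Dict Int (PySem.Dict Int Int)) (k : Int),
    (c.get? k).isSome → ((rs.foldl (pvCacheStep mapping) c).get? k).isSome := by
  intro rs
  induction rs with
  | nil => intro c k h; exact h
  | cons p rs ih =>
    intro c k h
    refine ih _ k ?_
    simp only [pvCacheStep]
    split_ifs with hcon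
    · exact h
    · rw [PySem.Dict.get?_insert]
      split_ifs with h2
      · simp
      · exact h
 
-- after the first pass the cache answers for every bitstring length in results
lemma pv_cache_hit (mapping : List (String × Int)) :
    ∀ (rs : List (String × Int)) (c : PySem.Dict Int (PySem.Dict Int Int)) (p : String × Int), p ∈ rs →
    ((rs.foldl (pvCacheStep mapping) c).get? ((p.1.toList.length : Nat) : Int)).isSome := by
  intro rs
  induction rs with
  | nil => intro c p hp; cases hp
  | cons q rs ih =>
    intro c p hp
    rcases List.mem_cons.1 hp with rfl | hp
    · simp only [List.foldl_cons]
      refine pv_cache_mono mapping rs _ _ ?_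
      simp only [pvCacheStep]
      split_ifs with hcon
      · rw [PySem.Dict.contains_eq_isSome_get?] at hcon; exact hcon
      · rw [PySem.Dict.get?_insert]
        simp
    · exact ih _ p hp

lemma pv_cache_getD (mapping : List (String × Int)) (rs : List (String × Int))
    (p : String × Int) (hp : p ∈ rs) :
    (rs.foldl (pvCacheStep mapping) PySem.Dict.empty).getD ((p.1.toList.length : Nat) : Int) PySem.Dict.empty
      = pvInvFor mapping ((p.1.toList.length : Nat) : Int) := by
  have hs := pv_cache_hit mapping rs PySem.Dict.empty p hp
  cases hv : (rs.foldl (pvCacheStep mapping) PySem.Dict.empty).get? ((p.1.toList.length : Nat) : Int) with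
  | none => rw [hv] at hs; cases hs
  | some v =>
    have := pv_cache_inv mapping rs PySem.Dict.empty
      (by intro k v h; rw [PySem.Dict.get?_empty] at h; cases h) _ _ hv
    rw [PySem.Dict.getD_eq_get?_getD, hv, Option.getD_some, this]

-- ===== outer loop congruence =====
lemma pv_outer_fold (mapping : List (String × Int)) (L : Int)
    (inverses : PySem.Dict Int (PySem.Dict Int Int)) :
    ∀ (rs : List (String × Int)) (out : PySem.Dict String Int),
    (∀ p ∈ rs, ∀ k ∈ List.range p.1.toList.length, pvOk mapping L (k : Int) = true) →
    (∀ p ∈ rs, inverses.getD ((p.1.toList.length : Nat) : Int) PySem.Dict.empty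
        = pvInvFor mapping ((p.1.toList.length : Nat) : Int)) →
    rs.foldl (fun (out : PySem.Dict String Int) p =>
        let tmp0 : List Char := (PySem.List.pyRange 0 L 1).map (fun _ => '0')
        let tmp : List Char := (PySem.List.enumerate p.1.toList 0).foldl
            (fun t iv => PySem.List.pySetD t (pvMapGet mapping iv.1) iv.2) tmp0
        out.insert (String.ofList tmp) p.2) out
    = rs.foldl (fun (out : PySem.Dict String Int) p =>
        let inv := inverses.getD ((p.1.toList.length : Nat) : Int) PySem.Dict.empty
        out.insert (String.ofList ((PySem.List.pyRange 0 L 1).map (fun j =>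
          match inv.get? j with
          | some i => PySem.List.pyGetD p.1.toList i '0'
          | none => '0'))) p.2) out := by
  intro rs
  induction rs with
  | nil => intro out _ _; rfl
  | cons p rs ih =>
    intro out hall hinv
    simp only [List.foldl_cons]
    have hp := hall p (by simp)
    have hgood : ∀ q ∈ PySem.List.enumerate p.1.toList 0,
        0 ≤ pvMapGet mapping q.1 ∧ pvMapGet mapping q.1 < L := by
      intro q hq
      rcases (PySem.List.mem_enumerate_iff _ _ _).1 hq with ⟨k, hk, rfl⟩
      have := hp k (List.mem_range.2 hk)
      simpa using pv_good mapping L ((0 : Int) + k) (by simpa using this)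
    rw [pv_chars_eq mapping L p.1.toList hgood]
    rw [hinv p (by simp)]
    exact ih _ (fun q hq => hall q (by simp [hq])) (fun q hq => hinv q (by simp [hq]))

-- ===== VERDICT (by name: the statement is the Claim_ definition above) =====
theorem remap_result_spec : Claim_equal_remap_result := by
  intro results mapping L _ hpre
  unfold Pre_remap_result at hpre
  unfold Spec_remap_result remap_result remap_result_alt
  refine congrArg PySem.Dict.items ?_
  refine pv_outer_fold mapping L _ results PySem.Dict.empty ?_ ?_
  · intro p hp k hk
    exact List.all_eq_true.1 (List.all_eq_true.1 hpre p hp) k hk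
  · intro p hp
    exact pv_cache_getD mapping results p hp
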